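-- pv_equiv track=rewrite | github.com/hangli22/CodeGraph_Strengthened_Swe_Agent | code_graph_builder/skeleton_builder.py | _choose_parent_candidate
-- ===== SOURCE A (Python) =====
-- from typing import Any, Dict, List, Optional, Set, Tuple
--
-- def _choose_parent_candidate(
--
--     child_id: str,
--     file_rel: str,
--     accessible: Set[str],
--     candidates: List[Tuple[str, str]],
-- ) -> Optional[str]:
--     """
--     选择继承父类候选。
--
--     收紧旧逻辑：不再在多个不可判定同名候选中直接取 candidates[0]。
--     只在高置信或唯一候选时连边，否则返回 None。
--     """
--     if not candidates:
--         return None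
--
--     same_file = [(cid, frel) for cid, frel in candidates if frel == file_rel and cid != child_id]
--     if len(same_file) == 1:
--         return same_file[0][0]
--
--     accessible_candidates = [
--         (cid, frel)
--         for cid, frel in candidates
--         if frel in accessible and cid != child_id
--     ]
--     if len(accessible_candidates) == 1:
--         return accessible_candidates[0][0]
--
--     non_self_candidates = [(cid, frel) for cid, frel in candidates if cid != child_id]
--     if len(non_self_candidates) == 1:
--         return non_self_candidates[0][0]
--
--     return None
-- ===== SOURCE B (Python) =====
-- from typing import List, Optional, Set, Tuple
--
-- def _choose_parent_candidate(
--     child_id: str,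
--     file_rel: str,
--     accessible: Set[str],
--     candidates: List[Tuple[str, str]],
-- ) -> Optional[str]:
--     """Single pass over candidates with three counters instead of three filter lists."""
--     if not candidates:
--         return None
--     sf_n = ac_n = ns_n = 0
--     sf_cid = ac_cid = ns_cid = None
--     for cid, frel in candidates:
--         if cid == child_id:
--             continue
--         if frel == file_rel:
--             sf_n += 1
--             sf_cid = cid
--         if frel in accessible:
--             ac_n += 1
--             ac_cid = cid
--         ns_n += 1
--         ns_cid = cid
--     if sf_n == 1:
--         return sf_cid
--     if ac_n == 1:
--         return ac_cid
--     if ns_n == 1: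
--         return ns_cid
--     return None
-- ===== Notes on version B (the rewrite author's own statement) =====
-- stated objective: alternative
-- what changed: Replaced A's three separate filter-list passes (plus len/indexing on each) by a single loop over candidates maintaining, for each of the three rules, a counter and the last matching cid, then applying the same priority on the counters.
import Mathlib
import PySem

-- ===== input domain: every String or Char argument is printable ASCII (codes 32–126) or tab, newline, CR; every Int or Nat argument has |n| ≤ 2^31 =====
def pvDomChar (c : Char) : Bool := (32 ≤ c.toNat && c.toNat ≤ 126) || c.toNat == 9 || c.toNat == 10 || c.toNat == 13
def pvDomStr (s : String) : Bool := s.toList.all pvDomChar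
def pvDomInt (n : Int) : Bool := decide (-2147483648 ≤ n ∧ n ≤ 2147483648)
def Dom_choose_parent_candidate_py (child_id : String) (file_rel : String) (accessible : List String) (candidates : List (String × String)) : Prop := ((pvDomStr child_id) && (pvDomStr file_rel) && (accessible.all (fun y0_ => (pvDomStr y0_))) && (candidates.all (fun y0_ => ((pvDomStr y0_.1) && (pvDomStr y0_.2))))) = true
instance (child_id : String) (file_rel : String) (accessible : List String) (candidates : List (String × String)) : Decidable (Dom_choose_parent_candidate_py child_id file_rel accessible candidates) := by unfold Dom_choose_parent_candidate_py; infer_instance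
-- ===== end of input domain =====

-- B replaces A's three filter-list passes by one loop keeping three counters and the
-- last matching cid for each rule (objective: alternative / single pass).

-- ===== PORT A =====
def choose_parent_candidate_py (child_id : String) (file_rel : String) (accessible : List String) (candidates : List (String × String)) : Option String :=
  if candidates.isEmpty then none
  else
    let same_file := candidates.filter (fun x => x.2 == file_rel && x.1 != child_id)
    if same_file.length == 1 then (PySem.List.pyGet? same_file 0).map Prod.fst
    else
      let accessible_candidates := candidates.filter (fun x => accessible.contains x.2 && x.1 != child_id)
      if accessible_candidates.length == 1 then (PySem.List.pyGet? accessible_candidates 0).map Prod.fst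
      else
        let non_self_candidates := candidates.filter (fun x => x.1 != child_id)
        if non_self_candidates.length == 1 then (PySem.List.pyGet? non_self_candidates 0).map Prod.fst
        else none

-- ===== PORT B =====
-- state: ((sf_n, sf_cid), (ac_n, ac_cid), (ns_n, ns_cid))
def pvAltStep (child_id : String) (file_rel : String) (accessible : List String)
    (s : (Int × Option String) × (Int × Option String) × (Int × Option String))
    (x : String × String) : (Int × Option String) × (Int × Option String) × (Int × Option String) :=
  if x.1 == child_id then s
  else
    ((if x.2 == file_rel then (s.1.1 + 1, some x.1) else s.1),
     (if accessible.contains x.2 then (s.2.1.1 + 1, some x.1) else s.2.1),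
     (s.2.2.1 + 1, some x.1))

def choose_parent_candidate_py_alt (child_id : String) (file_rel : String) (accessible : List String) (candidates : List (String × String)) : Option String :=
  if candidates.isEmpty then none
  else
    let s := candidates.foldl (pvAltStep child_id file_rel accessible) ((0, none), (0, none), (0, none))
    if s.1.1 == 1 then s.1.2
    else if s.2.1.1 == 1 then s.2.1.2
    else if s.2.2.1 == 1 then s.2.2.2
    else none

-- ===== PRECONDITION & SPEC =====
def Spec_choose_parent_candidate_py (child_id : String) (file_rel : String) (accessible : List String) (candidates : List (String × String)) (out : Option String) : Prop := out = choose_parent_candidate_py_alt child_id file_rel accessible candidates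
instance (child_id : String) (file_rel : String) (accessible : List String) (candidates : List (String × String)) (out : Option String) : Decidable (Spec_choose_parent_candidate_py child_id file_rel accessible candidates out) := by unfold Spec_choose_parent_candidate_py; infer_instance

-- ===== CLAIM (what is proved, stated in full; the proofs are below) =====
def Claim_equal_choose_parent_candidate_py : Prop := ∀ (child_id : String) (file_rel : String) (accessible : List String) (candidates : List (String × String)), Dom_choose_parent_candidate_py child_id file_rel accessible candidates → Spec_choose_parent_candidate_py child_id file_rel accessible candidates (choose_parent_candidate_py child_id file_rel accessible candidates)

-- ===== LEMMAS AND PROOFS =====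

-- combine an accumulator component with the filtered suffix
def pvComb (s : Int × Option String) (m : List (String × String)) : Int × Option String :=
  (s.1 + m.length, m.foldl (fun _ x => some x.1) s.2)

theorem pvComb_nil (s : Int × Option String) : pvComb s [] = s := by
  simp [pvComb]

theorem pvComb_cons (s : Int × Option String) (a : String × String) (m : List (String × String)) :
    pvComb s (a :: m) = pvComb (s.1 + 1, some a.1) m := by
  simp [pvComb, List.foldl_cons]
  omega

theorem pvFold_eq (child_id : String) (file_rel : String) (accessible : List String)
    (l : List (String × String))
    (s : (Int × Option String) × (Int × Option String) × (Int × Option String)) :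
    l.foldl (pvAltStep child_id file_rel accessible) s
    = (pvComb s.1 (l.filter (fun x => x.2 == file_rel && x.1 != child_id)),
       pvComb s.2.1 (l.filter (fun x => accessible.contains x.2 && x.1 != child_id)),
       pvComb s.2.2 (l.filter (fun x => x.1 != child_id))) := by
  induction l generalizing s with
  | nil => simp [pvComb_nil]
  | cons a t ih =>
    by_cases hc : a.1 = child_id
    · simp [List.foldl_cons, pvAltStep, hc, ih]
    · by_cases hf : a.2 = file_rel
      · by_cases ha : a.2 ∈ accessible
        · rw [hf] at ha
          simp [List.foldl_cons, pvAltStep, hc, hf, ha, ih, pvComb_cons]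
        · rw [hf] at ha
          simp [List.foldl_cons, pvAltStep, hc, hf, ha, ih, pvComb_cons]
      · by_cases ha : a.2 ∈ accessible
        · simp [List.foldl_cons, pvAltStep, hc, hf, ha, ih, pvComb_cons]
        · simp [List.foldl_cons, pvAltStep, hc, hf, ha, ih, pvComb_cons]

theorem pvBranch (m : List (String × String)) :
    ((pvComb (0, none) m).1 == 1) = (m.length == 1) := by
  simp [pvComb]

theorem pvOne (m : List (String × String)) (h : m.length = 1) :
    (pvComb (0, none) m).2 = (PySem.List.pyGet? m 0).map Prod.fst := by
  match m, h with
  | [a], _ => simp [pvComb, PySem.List.pyGet?, PySem.List.pyIdx?]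

-- ===== VERDICT (by name: the statement is the Claim_ definition above) =====
theorem choose_parent_candidate_py_spec : Claim_equal_choose_parent_candidate_py := by
  intro child_id file_rel accessible candidates _
  unfold Spec_choose_parent_candidate_py choose_parent_candidate_py choose_parent_candidate_py_alt
  by_cases he : candidates.isEmpty
  · simp [he]
  · simp only [he, Bool.false_eq_true, if_false]
    rw [pvFold_eq]
    set msf := candidates.filter (fun x => x.2 == file_rel && x.1 != child_id) with hmsf
    set mac := candidates.filter (fun x => accessible.contains x.2 && x.1 != child_id) with hmac
    set mns := candidates.filter (fun x => x.1 != child_id) with hmns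
    simp only [pvBranch]
    by_cases h1 : msf.length = 1
    · simp [h1, pvOne _ h1]
    · simp only [beq_iff_eq, h1, if_false]
      by_cases h2 : mac.length = 1
      · simp [h2, pvOne _ h2]
      · simp only [h2, if_false]
        by_cases h3 : mns.length = 1
        · simp [h3, pvOne _ h3]
        · simp [h3]
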